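-- pv_equiv track=rewrite | github.com/goldenmean/python | even_length_subarrays_odd_numbered_elems.py | count_even_subarrays_odd_elements
-- ===== SOURCE A (Python) =====
-- def count_even_subarrays_odd_elements(arr):
--     n = len(arr)
--     count = 0
--     odd_count = [0] * (n + 1)
--
--     for i in range(n):
--         odd_count[i + 1] = odd_count[i] + (arr[i] % 2)
--
--     for i in range(n):
--         for j in range(i + 1, n + 1, 2):
--             if (odd_count[j] - odd_count[i]) % 2 == 1:
--                 count += 1
--
--     return count
-- ===== SOURCE B (Python) =====
-- def count_even_subarrays_odd_elements(arr):
--     # One pass over the n+1 prefix positions, bucketed by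
--     # (position parity, parity of odd-count so far); the answer is the
--     # number of cross pairs in which both parities differ.
--     p = 0
--     c00, c01, c10, c11 = 1, 0, 0, 0  # position 0: even position, even odd-count
--     for i, x in enumerate(arr):
--         p = (p + x) % 2
--         if (i + 1) % 2 == 0:
--             if p == 0:
--                 c00 += 1
--             else:
--                 c01 += 1
--         else:
--             if p == 0:
--                 c10 += 1
--             else:
--                 c11 += 1
--     return c00 * c11 + c01 * c10
-- ===== Notes on version B (the rewrite author's own statement) =====
-- stated objective: faster
-- what changed: Replaced the quadratic double loop over index pairs by a single pass that buckets the n+1 prefix positions by (position parity, odd-count parity) and multiplies the cross-bucket counts.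
import Mathlib
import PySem

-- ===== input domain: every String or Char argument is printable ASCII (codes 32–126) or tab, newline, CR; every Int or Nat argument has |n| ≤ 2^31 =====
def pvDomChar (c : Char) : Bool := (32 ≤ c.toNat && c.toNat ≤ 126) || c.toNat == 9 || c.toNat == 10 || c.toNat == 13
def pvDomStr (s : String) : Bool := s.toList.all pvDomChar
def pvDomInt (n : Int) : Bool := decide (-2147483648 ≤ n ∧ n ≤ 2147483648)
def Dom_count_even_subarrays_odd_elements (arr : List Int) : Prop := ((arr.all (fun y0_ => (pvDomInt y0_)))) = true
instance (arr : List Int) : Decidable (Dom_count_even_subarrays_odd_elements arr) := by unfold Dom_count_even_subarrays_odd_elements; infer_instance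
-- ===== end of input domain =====

-- B replaces A's quadratic double loop over index pairs by a single pass that buckets
-- the n+1 prefix positions by (position parity, odd-count parity) and multiplies the
-- cross-bucket counts (objective: faster).

-- ===== PORT A =====
-- The indices i, i+1 and j always lie in range, so xs[i] / xs[i+1]=v are ported with
-- pyGetD / pySetD (exact where Python does not raise; this Python never raises).
def count_even_subarrays_odd_elements (arr : List Int) : Int :=
  let n : Int := PySem.List.len arr
  let count : Int := 0
  let odd_count : List Int := List.replicate (n + 1).toNat (0 : Int)
  let odd_count := (PySem.List.pyRange 0 n 1).foldl
    (fun oc i =>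
      PySem.List.pySetD oc (i + 1)
        (PySem.List.pyGetD oc i 0 + PySem.Int.mod (PySem.List.pyGetD arr i 0) 2))
    odd_count
  let count := (PySem.List.pyRange 0 n 1).foldl
    (fun c i =>
      (PySem.List.pyRange (i + 1) (n + 1) 2).foldl
        (fun c j =>
          if PySem.Int.mod (PySem.List.pyGetD odd_count j 0 - PySem.List.pyGetD odd_count i 0) 2 == 1
          then c + 1 else c)
        c)
    count
  count

-- ===== PORT B =====
-- State tuple (p, c00, c01, c10, c11): Source B's running parity and its four bucket counters.
def count_even_subarrays_odd_elements_alt (arr : List Int) : Int :=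
  let st := (PySem.List.enumerate arr).foldl
    (fun (st : Int × Int × Int × Int × Int) ix =>
      let p := PySem.Int.mod (st.1 + ix.2) 2
      if PySem.Int.mod (ix.1 + 1) 2 == 0 then
        if p == 0 then (p, st.2.1 + 1, st.2.2.1, st.2.2.2.1, st.2.2.2.2)
        else (p, st.2.1, st.2.2.1 + 1, st.2.2.2.1, st.2.2.2.2)
      else
        if p == 0 then (p, st.2.1, st.2.2.1, st.2.2.2.1 + 1, st.2.2.2.2)
        else (p, st.2.1, st.2.2.1, st.2.2.2.1, st.2.2.2.2 + 1))
    ((0 : Int), (1 : Int), (0 : Int), (0 : Int), (0 : Int))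
  st.2.1 * st.2.2.2.2 + st.2.2.1 * st.2.2.2.1

-- ===== PRECONDITION & SPEC =====
def Spec_count_even_subarrays_odd_elements (arr : List Int) (out : Int) : Prop := out = count_even_subarrays_odd_elements_alt arr
instance (arr : List Int) (out : Int) : Decidable (Spec_count_even_subarrays_odd_elements arr out) := by unfold Spec_count_even_subarrays_odd_elements; infer_instance

-- ===== CLAIM (what is proved, stated in full; the proofs are below) =====
def Claim_equal_count_even_subarrays_odd_elements : Prop := ∀ (arr : List Int), Dom_count_even_subarrays_odd_elements arr → Spec_count_even_subarrays_odd_elements arr (count_even_subarrays_odd_elements arr)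

-- ===== LEMMAS AND PROOFS =====

/-- Number of odd elements among the first `k` entries (Python parities: `x % 2 ∈ {0,1}`). -/
def prefOdd (arr : List Int) (k : Nat) : Int := ((arr.take k).map (fun x => x % 2)).sum

/-- The prefix-count list A builds. -/
def ocL (arr : List Int) : List Int := (List.range (arr.length + 1)).map (prefOdd arr)

/-- Bucket count: prefix positions `k ≤ n` with `k % 2 = s` and odd-count parity `t`. -/
def bkt (arr : List Int) (s : Nat) (t : Int) (n : Nat) : Nat :=
  ∑ k ∈ Finset.range (n + 1), if k % 2 = s ∧ prefOdd arr k % 2 = t then 1 else 0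

/-- Pair count: pairs `i < j ≤ n` of different position parity and different odd-count parity. -/
def pairsS (arr : List Int) (n : Nat) : Nat :=
  ∑ i ∈ Finset.range n, ∑ j ∈ Finset.Ico (i + 1) (n + 1),
    if (j - i) % 2 = 1 ∧ prefOdd arr i % 2 ≠ prefOdd arr j % 2 then 1 else 0

theorem prefOdd_succ (arr : List Int) (m : Nat) (hm : m < arr.length) :
    prefOdd arr (m + 1) = prefOdd arr m + arr[m] % 2 := by
  unfold prefOdd
  rw [List.map_take, List.map_take,
    List.sum_take_succ (arr.map (fun x => x % 2)) m (by simpa using hm)]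
  simp

theorem prefOdd_append_le (arr : List Int) (x : Int) (k : Nat) (hk : k ≤ arr.length) :
    prefOdd (arr ++ [x]) k = prefOdd arr k := by
  unfold prefOdd
  rw [List.take_append_of_le_length hk]

theorem prefOdd_append_top (arr : List Int) (x : Int) :
    prefOdd (arr ++ [x]) (arr.length + 1) = prefOdd arr arr.length + x % 2 := by
  unfold prefOdd
  rw [List.take_add_one]
  simp

theorem length_ocL (arr : List Int) : (ocL arr).length = arr.length + 1 := by simp [ocL]

/-- A's first loop builds exactly the prefix-count list. -/
theorem ocBuild (arr : List Int) (m : Nat) (hm : m ≤ arr.length) :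
    (PySem.List.pyRange 0 (m : Int) 1).foldl
      (fun oc i =>
        PySem.List.pySetD oc (i + 1)
          (PySem.List.pyGetD oc i 0 + PySem.Int.mod (PySem.List.pyGetD arr i 0) 2))
      (List.replicate (arr.length + 1) (0 : Int))
    = (ocL arr).take (m + 1) ++ List.replicate (arr.length - m) 0 := by
  induction m with
  | zero =>
      rw [PySem.List.pyRange_one_eq_nil (by norm_num)]
      simp only [List.foldl_nil]
      have h1 : (ocL arr).take 1 = [0] := by
        cases harr : arr with
        | nil => simp [ocL, prefOdd]
        | cons y ys => simp [ocL, List.range_succ_eq_map, prefOdd]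
      rw [h1]
      rw [show arr.length + 1 = 1 + arr.length by omega, List.replicate_add]
      rfl
  | succ m ih =>
      have hm' : m ≤ arr.length := by omega
      rw [show ((m+1 : Nat) : Int) = (m : Int) + 1 by push_cast; ring,
        PySem.List.pyRange_one_succ_right (by positivity), List.foldl_append, ih hm']
      simp only [List.foldl_cons, List.foldl_nil]
      set T := (ocL arr).take (m + 1) with hT
      have hTlen : T.length = m + 1 := by
        rw [hT, List.length_take, length_ocL]; omega
      have hget_oc : PySem.List.pyGetD (T ++ List.replicate (arr.length - m) 0) (m : Int) 0
          = prefOdd arr m := by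
        rw [PySem.List.pyGetD_natCast]
        rw [List.getD_eq_getElem?_getD, List.getElem?_append_left (by omega)]
        rw [hT, List.getElem?_take_of_lt (by omega)]
        simp only [ocL, List.getElem?_map, List.getElem?_range (show m < arr.length + 1 by omega)]
        rfl
      have hget_arr : PySem.List.pyGetD arr (m : Int) 0 = arr[m]'(by omega) := by
        rw [PySem.List.pyGetD_natCast, List.getD_eq_getElem?_getD,
          List.getElem?_eq_getElem (by omega)]
        rfl
      rw [hget_oc, hget_arr]
      rw [show ((m : Int) + 1) = ((m + 1 : Nat) : Int) by push_cast; ring,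
        PySem.List.pySetD_natCast]
      have hmod : PySem.Int.mod (arr[m]'(by omega)) 2 = arr[m]'(by omega) % 2 := by
        rw [PySem.Int.mod_eq_emod_of_pos] ; norm_num
      rw [hmod]
      rw [List.set_append_right _ _ (by omega)]
      have hrep : arr.length - m = (arr.length - (m+1)) + 1 := by omega
      rw [hTlen, Nat.sub_self, hrep, List.replicate_succ, List.set_cons_zero]
      have htake : (ocL arr).take (m + 1 + 1) = T ++ [prefOdd arr m + arr[m]'(by omega) % 2] := by
        rw [List.take_add_one, hT]
        congr 1
        rw [List.getElem?_eq_getElem (by rw [length_ocL]; omega)]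
        simp [ocL, prefOdd_succ arr m (by omega)]
      rw [htake, List.append_assoc]
      rfl

/-- `range(a, b, 2)` is the step-1 range filtered to offsets of even distance from `a`. -/
theorem stepTwoFilter (a b : Int) :
    PySem.List.pyRange a b 2 = (PySem.List.pyRange a b 1).filter (fun j => (j - a) % 2 == 0) := by
  have nd2 : (PySem.List.pyRange a b 2).Nodup := by
    rw [PySem.List.pyRange_of_pos a b (by norm_num)]
    exact List.Nodup.map (fun x y h => by omega) (List.nodup_range)
  have sp2 : (PySem.List.pyRange a b 2).Pairwise (· < ·) := by
    rw [PySem.List.pyRange_of_pos a b (by norm_num)]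
    refine List.pairwise_map.mpr ?_
    exact List.pairwise_lt_range.imp (fun h => by omega)
  have ndf : ((PySem.List.pyRange a b 1).filter (fun j => (j - a) % 2 == 0)).Nodup :=
    (PySem.List.nodup_pyRange_one a b).filter _
  have spf : ((PySem.List.pyRange a b 1).filter (fun j => (j - a) % 2 == 0)).Pairwise (· < ·) :=
    (PySem.List.pairwise_lt_pyRange_one a b).filter _
  refine List.Perm.eq_of_pairwise (fun x y _ _ h1 h2 => by omega) sp2 spf ?_
  refine (List.perm_ext_iff_of_nodup nd2 ndf).mpr ?_
  intro x
  rw [List.mem_filter, PySem.List.mem_pyRange_iff_of_pos (by norm_num),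
    PySem.List.mem_pyRange_one]
  constructor
  · rintro ⟨h1, h2, h3⟩
    exact ⟨⟨h1, h2⟩, by simp; omega⟩
  · rintro ⟨⟨h1, h2⟩, h3⟩
    simp at h3
    exact ⟨h1, h2, by omega⟩

theorem countP_range_eq (m : Nat) (p : Nat → Bool) :
    ((List.range m).countP p : Nat) = ∑ k ∈ Finset.range m, if p k then 1 else 0 := by
  induction m with
  | zero => simp
  | succ m ih =>
      rw [List.range_succ, List.countP_append, Finset.sum_range_succ, ih]
      simp [List.countP_cons]

/-- A's value is the pair count. -/
theorem A_eq_pairs (arr : List Int) :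
    count_even_subarrays_odd_elements arr = (pairsS arr arr.length : Int) := by
  unfold count_even_subarrays_odd_elements
  simp only [PySem.List.len_eq]
  simp only [show ((arr.length : Int) + 1).toNat = arr.length + 1 from by omega]
  simp only [ocBuild arr arr.length le_rfl, Nat.sub_self,
    List.replicate_zero, List.append_nil,
    List.take_of_length_le (show (ocL arr).length ≤ arr.length + 1 from by simp [ocL])]
  have hcong : ∀ (acc : Int), ∀ i ∈ PySem.List.pyRange 0 (arr.length : Int),
      (PySem.List.pyRange (i + 1) ((arr.length : Int) + 1) 2).foldl
        (fun c j =>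
          if PySem.Int.mod (PySem.List.pyGetD (ocL arr) j 0 - PySem.List.pyGetD (ocL arr) i 0) 2 == 1
          then c + 1 else c) acc
      = acc +
        (((PySem.List.pyRange (i+1) ((arr.length : Int)+1) 1).filter
            (fun j => (j - (i+1)) % 2 == 0)).countP
          (fun j => PySem.Int.mod (PySem.List.pyGetD (ocL arr) j 0 - PySem.List.pyGetD (ocL arr) i 0) 2 == 1) : Int) := by
    intro acc i _
    rw [stepTwoFilter (i+1) ((arr.length : Int)+1), PySem.List.foldl_if_add_one]
  rw [PySem.List.foldl_congr_mem _ _ _ 0 hcong, PySem.List.foldl_add, PySem.List.pyRange_zero_nat,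
    List.map_map, zero_add]
  show ∑ i ∈ Finset.range arr.length, _ = _
  unfold pairsS
  push_cast
  refine Finset.sum_congr rfl ?_
  intro i hi
  rw [Finset.mem_range] at hi
  simp only [Function.comp]
  rw [List.countP_filter]
  rw [show ((arr.length : Int) + 1) = ((arr.length + 1 : Nat) : Int) from by push_cast; ring,
    show ((i : Int) + 1) = ((i + 1 : Nat) : Int) from by push_cast; ring,
    PySem.List.pyRange_one, List.countP_map,
    show (((arr.length + 1 : Nat) : Int) - ((i + 1 : Nat) : Int)).toNat = arr.length - i from by omega,
    countP_range_eq]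
  rw [Finset.sum_Ico_eq_sum_range,
    show arr.length + 1 - (i + 1) = arr.length - i from by omega]
  push_cast
  refine Finset.sum_congr rfl ?_
  intro k hk
  rw [Finset.mem_range] at hk
  simp only [Function.comp_apply]
  simp only [show ((i : Int) + 1 + (k : Int)) = ((i + 1 + k : Nat) : Int) from by push_cast; ring]
  have hgd : ∀ (m : Nat), m ≤ arr.length →
      PySem.List.pyGetD (ocL arr) ((m : Nat) : Int) 0 = prefOdd arr m := by
    intro m hm
    rw [PySem.List.pyGetD_natCast, List.getD_eq_getElem?_getD,
      List.getElem?_eq_getElem (show m < (ocL arr).length from by simp [ocL]; omega)]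
    simp [ocL]
  simp only [hgd (i + 1 + k) (by omega), hgd i (by omega)]
  have hm2 : ∀ x : Int, PySem.Int.mod x 2 = x % 2 :=
    fun x => PySem.Int.mod_eq_emod_of_pos (by norm_num)
  simp only [hm2, beq_iff_eq, Bool.and_eq_true]
  have hiff : ((prefOdd arr (i+1+k) - prefOdd arr i) % 2 = 1 ∧ (((i+1+k : Nat) : Int) - ((i:Int) + 1)) % 2 = 0)
      ↔ ((i + 1 + k - i) % 2 = 1 ∧ ¬ prefOdd arr i % 2 = prefOdd arr (i+1+k) % 2) := by
    omega
  simp only [hiff]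

/-- The bucketing identity: pair count = product of opposite buckets. -/
theorem pairs_eq_buckets (arr : List Int) (n : Nat) :
    pairsS arr n = bkt arr 0 0 n * bkt arr 1 1 n + bkt arr 0 1 n * bkt arr 1 0 n := by
  induction n with
  | zero =>
      simp [pairsS, bkt]
  | succ n ih =>
      have hsplit : pairsS arr (n + 1)
          = pairsS arr n + ∑ i ∈ Finset.range (n + 1),
              (if (n + 1 - i) % 2 = 1 ∧ prefOdd arr i % 2 ≠ prefOdd arr (n + 1) % 2 then 1 else 0) := by
        unfold pairsS
        rw [Finset.sum_range_succ]
        have hin : ∀ i ∈ Finset.range n,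
            (∑ j ∈ Finset.Ico (i + 1) (n + 1 + 1),
              if (j - i) % 2 = 1 ∧ prefOdd arr i % 2 ≠ prefOdd arr j % 2 then 1 else 0)
            = (∑ j ∈ Finset.Ico (i + 1) (n + 1),
                if (j - i) % 2 = 1 ∧ prefOdd arr i % 2 ≠ prefOdd arr j % 2 then 1 else 0)
              + (if (n + 1 - i) % 2 = 1 ∧ prefOdd arr i % 2 ≠ prefOdd arr (n + 1) % 2 then 1 else 0) := by
          intro i hi
          rw [Finset.mem_range] at hi
          rw [Finset.sum_Ico_succ_top (by omega)]
        rw [Finset.sum_congr rfl hin, Finset.sum_add_distrib, Finset.sum_range_succ]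
        rw [Finset.sum_Ico_eq_sum_range, show n + 1 + 1 - (n + 1) = 1 from by omega,
          Finset.sum_range_one]
        rw [show n + 1 + (0:Nat) = n + 1 from by omega]
        omega
      have hbkt : ∀ (s : Nat) (t : Int), bkt arr s t (n + 1)
          = bkt arr s t n + (if (n + 1) % 2 = s ∧ prefOdd arr (n + 1) % 2 = t then 1 else 0) := by
        intro s t
        unfold bkt
        rw [Finset.sum_range_succ]
      have hnew : ∀ (s : Nat) (t : Int), (n + 1) % 2 + s = 1 → prefOdd arr (n + 1) % 2 = t →
          (∑ i ∈ Finset.range (n + 1),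
            if (n + 1 - i) % 2 = 1 ∧ prefOdd arr i % 2 ≠ prefOdd arr (n + 1) % 2 then 1 else 0)
          = bkt arr s (1 - t) n := by
        intro s t hs ht
        unfold bkt
        refine Finset.sum_congr rfl ?_
        intro i hi
        rw [Finset.mem_range] at hi
        refine if_congr ?_ rfl rfl
        have h0 := Int.emod_two_eq_zero_or_one (prefOdd arr i)
        have h1 := Int.emod_two_eq_zero_or_one (prefOdd arr (n + 1))
        constructor
        · rintro ⟨ha, hb⟩
          constructor
          · omega
          · omega
        · rintro ⟨ha, hb⟩
          constructor
          · omega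
          · omega
      rcases Nat.mod_two_eq_zero_or_one (n + 1) with hs | hs
      · rcases Int.emod_two_eq_zero_or_one (prefOdd arr (n + 1)) with ht | ht
        · rw [hsplit, hnew 1 0 (by omega) ht, ih, hbkt, hbkt, hbkt, hbkt]
          simp [hs, ht]
          ring
        · rw [hsplit, hnew 1 1 (by omega) ht, ih, hbkt, hbkt, hbkt, hbkt]
          simp [hs, ht]
          ring
      · rcases Int.emod_two_eq_zero_or_one (prefOdd arr (n + 1)) with ht | ht
        · rw [hsplit, hnew 0 0 (by omega) ht, ih, hbkt, hbkt, hbkt, hbkt]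
          simp [hs, ht]
          ring
        · rw [hsplit, hnew 0 1 (by omega) ht, ih, hbkt, hbkt, hbkt, hbkt]
          simp [hs, ht]
          ring

theorem bkt_append (arr : List Int) (x : Int) (s : Nat) (t : Int) :
    bkt (arr ++ [x]) s t arr.length = bkt arr s t arr.length := by
  unfold bkt
  refine Finset.sum_congr rfl ?_
  intro k hk
  rw [Finset.mem_range] at hk
  rw [prefOdd_append_le arr x k (by omega)]

/-- B's loop maintains the running parity and the four bucket counts. -/
theorem Bfold (arr : List Int) :
    (PySem.List.enumerate arr).foldl
      (fun (st : Int × Int × Int × Int × Int) ix =>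
        let p := PySem.Int.mod (st.1 + ix.2) 2
        if PySem.Int.mod (ix.1 + 1) 2 == 0 then
          if p == 0 then (p, st.2.1 + 1, st.2.2.1, st.2.2.2.1, st.2.2.2.2)
          else (p, st.2.1, st.2.2.1 + 1, st.2.2.2.1, st.2.2.2.2)
        else
          if p == 0 then (p, st.2.1, st.2.2.1, st.2.2.2.1 + 1, st.2.2.2.2)
          else (p, st.2.1, st.2.2.1, st.2.2.2.1, st.2.2.2.2 + 1))
      ((0 : Int), (1 : Int), (0 : Int), (0 : Int), (0 : Int))
    = (prefOdd arr arr.length % 2,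
       (bkt arr 0 0 arr.length : Int), (bkt arr 0 1 arr.length : Int),
       (bkt arr 1 0 arr.length : Int), (bkt arr 1 1 arr.length : Int)) := by
  induction arr using List.reverseRecOn with
  | nil =>
      simp [bkt, prefOdd]
      decide
  | append_singleton xs x ih =>
      rw [show PySem.List.enumerate (xs ++ [x]) = PySem.List.enumerate (xs ++ [x]) 0 from rfl,
        PySem.List.enumerate_append]
      rw [List.foldl_append]
      rw [show PySem.List.enumerate xs 0 = PySem.List.enumerate xs from rfl, ih]
      have hlen : (xs ++ [x]).length = xs.length + 1 := by simp
      simp only [hlen]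
      have hm2 : ∀ y : Int, PySem.Int.mod y 2 = y % 2 :=
        fun y => PySem.Int.mod_eq_emod_of_pos (by norm_num)
      have henum : PySem.List.enumerate [x] ((0:Int) + xs.length) = [((0:Int) + xs.length, x)] := by
        rw [PySem.List.enumerate_cons]
        rfl
      rw [henum, List.foldl_cons, List.foldl_nil]
      simp only [hm2, beq_iff_eq, zero_add]
      have hp : (prefOdd xs xs.length % 2 + x) % 2 = prefOdd (xs ++ [x]) (xs.length + 1) % 2 := by
        rw [prefOdd_append_top]
        omega
      have hbsucc : ∀ (s : Nat) (t : Int), bkt (xs ++ [x]) s t (xs.length + 1)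
          = bkt xs s t xs.length + (if (xs.length + 1) % 2 = s ∧ prefOdd (xs ++ [x]) (xs.length + 1) % 2 = t then 1 else 0) := by
        intro s t
        unfold bkt
        rw [Finset.sum_range_succ]
        congr 1
        exact bkt_append xs x s t
      rcases Nat.mod_two_eq_zero_or_one (xs.length + 1) with hs | hs <;>
        rcases Int.emod_two_eq_zero_or_one (prefOdd (xs ++ [x]) (xs.length + 1)) with ht | ht
      all_goals {
        have hcond1 : ((xs.length : Int) + 1) % 2 = ((xs.length + 1) % 2 : Nat) := by push_cast; omega
        simp only [hp, hcond1, hs, ht, hbsucc]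
        norm_num [ht]
      }

/-- B's value is the bucket product. -/
theorem B_eq_buckets (arr : List Int) :
    count_even_subarrays_odd_elements_alt arr
      = ((bkt arr 0 0 arr.length * bkt arr 1 1 arr.length
          + bkt arr 0 1 arr.length * bkt arr 1 0 arr.length : Nat) : Int) := by
  unfold count_even_subarrays_odd_elements_alt
  rw [Bfold arr]
  push_cast
  ring

-- ===== VERDICT (by name: the statement is the Claim_ definition above) =====
theorem count_even_subarrays_odd_elements_spec : Claim_equal_count_even_subarrays_odd_elements := by
  intro arr _
  unfold Spec_count_even_subarrays_odd_elements
  rw [A_eq_pairs, B_eq_buckets, pairs_eq_buckets]
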